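-- pv_equiv track=rewrite | github.com/yashpatwa60/Management-system | test.py | status_attdendance2
-- ===== SOURCE A (Python) =====
-- def status_attdendance2(words):                                    #returns totall number of present and absent students
--
--         total_present = 0
--         total_absent = 0
--
--         for row in words:
--             if row == "P":
--                 total_present += 1
--             else:
--                 total_absent += 1
--
--         return total_present, total_absent
-- ===== SOURCE B (Python) =====
-- def status_attdendance2(words):
--     ws = list(words)
--
--     def go(lo, hi):
--         if hi - lo <= 1:
--             if hi - lo == 0:
--                 return (0, 0)
--             return (1, 0) if ws[lo] == "P" else (0, 1)
--         mid = (lo + hi) // 2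
--         p1, a1 = go(lo, mid)
--         p2, a2 = go(mid, hi)
--         return (p1 + p2, a1 + a2)
--
--     return go(0, len(ws))
-- ===== Notes on version B (the rewrite author's own statement) =====
-- stated objective: alternative
-- what changed: Replaces the sequential two-counter loop with a divide-and-conquer recursion that splits the list in halves, counts each half recursively and adds the resulting (present, absent) pairs.
import Mathlib
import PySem

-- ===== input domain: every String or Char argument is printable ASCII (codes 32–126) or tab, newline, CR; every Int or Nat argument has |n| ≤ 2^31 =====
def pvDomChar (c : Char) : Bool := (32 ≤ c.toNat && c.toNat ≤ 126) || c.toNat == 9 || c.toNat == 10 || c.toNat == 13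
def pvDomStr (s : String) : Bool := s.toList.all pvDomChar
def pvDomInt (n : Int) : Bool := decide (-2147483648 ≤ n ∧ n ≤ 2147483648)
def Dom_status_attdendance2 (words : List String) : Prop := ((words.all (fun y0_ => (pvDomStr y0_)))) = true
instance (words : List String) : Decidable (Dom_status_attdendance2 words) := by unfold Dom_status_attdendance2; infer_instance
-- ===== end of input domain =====

-- B replaces the sequential two-counter loop with a divide-and-conquer recursion over halves (objective: alternative, not faster).
-- ===== PORT A =====
def status_attdendance2 (words : List String) : Int × Int :=
  words.foldl (fun (st : Int × Int) row =>
    if row == "P" then (st.1 + 1, st.2) else (st.1, st.2 + 1)) (0, 0)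

-- ===== PORT B =====
-- go(lo,hi) on the list ws is ported as recursion on the sublist ws[lo:hi] (take/drop realise the halving).
def sa2Go (ws : List String) : Int × Int :=
  if _h : ws.length ≤ 1 then
    match ws with
    | [] => (0, 0)
    | w :: _ => if w == "P" then (1, 0) else (0, 1)
  else
    let mid := ws.length / 2
    let L := sa2Go (ws.take mid)
    let R := sa2Go (ws.drop mid)
    (L.1 + R.1, L.2 + R.2)
termination_by ws.length
decreasing_by
  · simp only [List.length_take]; omega
  · simp only [List.length_drop]; omega

def status_attdendance2_alt (words : List String) : Int × Int :=
  sa2Go words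

-- ===== PRECONDITION & SPEC =====
def Spec_status_attdendance2 (words : List String) (out : Int × Int) : Prop := out = status_attdendance2_alt words
instance (words : List String) (out : Int × Int) : Decidable (Spec_status_attdendance2 words out) := by unfold Spec_status_attdendance2; infer_instance

-- ===== CLAIM (what is proved, stated in full; the proofs are below) =====
def Claim_equal_status_attdendance2 : Prop := ∀ (words : List String), Dom_status_attdendance2 words → Spec_status_attdendance2 words (status_attdendance2 words)

-- ===== LEMMAS AND PROOFS =====
lemma foldl_counts (words : List String) (p q : Int) :
    words.foldl (fun (st : Int × Int) row =>
      if row == "P" then (st.1 + 1, st.2) else (st.1, st.2 + 1)) (p, q)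
    = (p + (words.count "P" : Int), q + ((words.length : Int) - (words.count "P" : Int))) := by
  induction words generalizing p q with
  | nil => simp
  | cons h t ih =>
      rw [List.foldl_cons]
      by_cases hP : h = "P"
      · subst hP
        have hc : List.count "P" ("P" :: t) = List.count "P" t + 1 := by simp
        rw [if_pos (by simp), ih, hc]
        simp only [Prod.mk.injEq, List.length_cons]
        constructor <;> · push_cast; ring
      · have hc : List.count "P" (h :: t) = List.count "P" t := by simp [hP]
        rw [if_neg (by simpa using hP), ih, hc]
        simp only [Prod.mk.injEq, List.length_cons]
        constructor
        all_goals first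
          | trivial
          | (push_cast; ring)

lemma sa2Go_eq_aux (n : Nat) : ∀ ws : List String, ws.length ≤ n →
    sa2Go ws = ((ws.count "P" : Int), (ws.length : Int) - (ws.count "P" : Int)) := by
  induction n with
  | zero =>
      intro ws hlen
      rw [sa2Go, dif_pos (by omega)]
      match ws, hlen with
      | [], _ => simp
  | succ n ih =>
      intro ws hlen
      by_cases h : ws.length ≤ 1
      · rw [sa2Go, dif_pos h]
        match ws, h with
        | [], _ => simp
        | [w], _ =>
            by_cases hP : w = "P"
            · subst hP; simp
            · simp [hP]
      · rw [sa2Go, dif_neg h]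
        have hL := ih (ws.take (ws.length / 2)) (by simp [List.length_take]; omega)
        have hR := ih (ws.drop (ws.length / 2)) (by simp [List.length_drop]; omega)
        simp only [hL, hR]
        have hsplit := List.take_append_drop (ws.length / 2) ws
        have hc : (ws.take (ws.length / 2)).count "P" + (ws.drop (ws.length / 2)).count "P"
            = ws.count "P" := by
          rw [← List.count_append, hsplit]
        have hl : (ws.take (ws.length / 2)).length + (ws.drop (ws.length / 2)).length
            = ws.length := by
          rw [← List.length_append, hsplit]
        simp only [Prod.mk.injEq]
        constructor <;> omega

lemma sa2Go_eq (ws : List String) :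
    sa2Go ws = ((ws.count "P" : Int), (ws.length : Int) - (ws.count "P" : Int)) :=
  sa2Go_eq_aux ws.length ws le_rfl

-- ===== VERDICT (by name: the statement is the Claim_ definition above) =====
theorem status_attdendance2_spec : Claim_equal_status_attdendance2 := by
  intro words _
  unfold Spec_status_attdendance2 status_attdendance2 status_attdendance2_alt
  rw [foldl_counts, sa2Go_eq]
  simp
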